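-- pv_equiv track=rewrite | github.com/liketheflower/CSCI150 | snakes/another_naivie_way_to_two_snakes.py | two_snakes
-- ===== SOURCE A (Python) =====
-- def two_snakes(n):
--       result=0
--       for head_snake1 in range(1,n+1):
--         for tail_snake1 in range(1,n+1):
--           for head_snake2 in range(1,n+1):
--            for tail_snake2 in range(1, n+1):
--              # check whether this 4 tuples satisfy the constraints.
--              if head_snake1>tail_snake1 and tail_snake1>head_snake2 and  head_snake2>tail_snake2 and head_snake1%2 != tail_snake1%2 and head_snake2%2 != tail_snake2%2:
--                result = result+1
--       return result
-- ===== SOURCE B (Python) =====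
-- def two_snakes(n):
--     # For each tail_snake1 = t: heads above t with opposite parity = (n - t + 1) // 2,
--     # and opposite-parity decreasing pairs strictly below t = ((t - 1) ** 2) // 4.
--     result = 0
--     for t in range(1, n + 1):
--         result += ((n - t + 1) // 2) * (((t - 1) ** 2) // 4)
--     return result
-- ===== Notes on version B (the rewrite author's own statement) =====
-- stated objective: faster
-- what changed: Replaced the quadruple nested loop over all candidate quadruples by a single loop over tail_snake1 that multiplies the closed-form count of opposite-parity heads above it by the closed-form count of decreasing opposite-parity pairs strictly below it.
import Mathlib
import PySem

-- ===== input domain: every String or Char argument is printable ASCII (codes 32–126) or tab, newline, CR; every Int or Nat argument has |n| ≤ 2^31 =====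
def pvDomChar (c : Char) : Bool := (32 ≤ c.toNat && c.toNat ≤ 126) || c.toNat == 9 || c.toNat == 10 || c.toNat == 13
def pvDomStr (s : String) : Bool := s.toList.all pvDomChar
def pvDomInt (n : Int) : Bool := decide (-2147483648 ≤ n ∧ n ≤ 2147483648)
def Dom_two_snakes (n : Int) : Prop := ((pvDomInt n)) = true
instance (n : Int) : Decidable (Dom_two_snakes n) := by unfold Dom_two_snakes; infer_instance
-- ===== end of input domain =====

-- B replaces A's quadruple nested loop by a single loop over tail_snake1 with
-- closed-form counts for the opposite-parity head above it and the decreasing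
-- opposite-parity pair below it.

-- ===== PORT A =====
def two_snakes (n : Int) : Int :=
  (PySem.List.pyRange 1 (n+1) 1).foldl (fun result head_snake1 =>
    (PySem.List.pyRange 1 (n+1) 1).foldl (fun result tail_snake1 =>
      (PySem.List.pyRange 1 (n+1) 1).foldl (fun result head_snake2 =>
        (PySem.List.pyRange 1 (n+1) 1).foldl (fun result tail_snake2 =>
          if head_snake1 > tail_snake1 ∧ tail_snake1 > head_snake2 ∧
             head_snake2 > tail_snake2 ∧
             PySem.Int.mod head_snake1 2 ≠ PySem.Int.mod tail_snake1 2 ∧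
             PySem.Int.mod head_snake2 2 ≠ PySem.Int.mod tail_snake2 2 then
            result + 1
          else result) result) result) result) 0

-- ===== PORT B =====
def two_snakes_alt (n : Int) : Int :=
  (PySem.List.pyRange 1 (n+1) 1).foldl (fun result t =>
    result + PySem.Int.floordiv (n - t + 1) 2 * PySem.Int.floordiv ((t - 1) ^ 2) 4) 0

-- ===== PRECONDITION & SPEC =====
def Spec_two_snakes (n : Int) (out : Int) : Prop := out = two_snakes_alt n
instance (n : Int) (out : Int) : Decidable (Spec_two_snakes n out) := by unfold Spec_two_snakes; infer_instance

-- ===== CLAIM (what is proved, stated in full; the proofs are below) =====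
def Claim_equal_two_snakes : Prop := ∀ (n : Int), Dom_two_snakes n → Spec_two_snakes n (two_snakes n)

-- ===== LEMMAS AND PROOFS =====

-- a foldl that only adds a per-element amount is the sum of those amounts
lemma foldl_add_sum {α : Type} (f : Int → α → Int) (g : α → Int)
    (hf : ∀ r x, f r x = r + g x) :
    ∀ (L : List α) (r : Int), L.foldl f r = r + (L.map g).sum := by
  intro L
  induction L with
  | nil => intro r; simp
  | cons a L ih => intro r; simp [List.foldl_cons, hf, ih, add_assoc]

lemma sum_sum_comm (L M : List Int) (f : Int → Int → Int) :
    (L.map (fun x => (M.map (fun y => f x y)).sum)).sum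
      = (M.map (fun y => (L.map (fun x => f x y)).sum)).sum := by
  induction L with
  | nil => simp
  | cons a L ih =>
      simp only [List.map_cons, List.sum_cons, ih]
      rw [← PySem.List.sum_map_add_int]

lemma sum_zero_of_mem {α : Type} (L : List α) (f : α → Int)
    (h : ∀ x ∈ L, f x = 0) : (L.map f).sum = 0 := by
  induction L with
  | nil => simp
  | cons a L ih =>
      simp only [List.map_cons, List.sum_cons]
      rw [h a (by simp), ih (fun x hx => h x (by simp [hx]))]
      simp

lemma e_factor (h1 t1 h2 t2 : Int) :
    (if h1 > t1 ∧ t1 > h2 ∧ h2 > t2 ∧ ¬(h1 % 2 = t1 % 2) ∧ ¬(h2 % 2 = t2 % 2)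
       then (1:Int) else 0)
    = (if h1 > t1 ∧ ¬(h1 % 2 = t1 % 2) then (1:Int) else 0)
      * (if t1 > h2 ∧ h2 > t2 ∧ ¬(h2 % 2 = t2 % 2) then (1:Int) else 0) := by
  by_cases a : h1 > t1 <;> by_cases b : t1 > h2 <;> by_cases c : h2 > t2 <;>
    by_cases d : h1 % 2 = t1 % 2 <;> by_cases f : h2 % 2 = t2 % 2 <;> simp [a, b, c, d, f]

-- number of x in [a, b) whose parity differs from t's
lemma parity_count (t a b : Int) (hab : a ≤ b) :
    ((PySem.List.pyRange a b 1).map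
        (fun x => if ¬(x % 2 = t % 2) then (1:Int) else 0)).sum
      = (b - a + (if a % 2 = t % 2 then 0 else 1)) / 2 := by
  have key : ∀ (k : Nat) (b : Int), a ≤ b → (b - a).toNat = k →
      ((PySem.List.pyRange a b 1).map
          (fun x => if ¬(x % 2 = t % 2) then (1:Int) else 0)).sum
        = (b - a + (if a % 2 = t % 2 then 0 else 1)) / 2 := by
    intro k
    induction k with
    | zero =>
        intro b hab h0
        have hb : b = a := by omega
        rw [hb]
        simp [PySem.List.pyRange_one_eq_nil (le_refl a)]
        by_cases h : a % 2 = t % 2 <;> simp [h]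
    | succ k ih =>
        intro b hab hk
        have hab' : a ≤ b - 1 := by omega
        have hsplit : PySem.List.pyRange a b 1
            = PySem.List.pyRange a (b-1) 1 ++ [b-1] := by
          have h := PySem.List.pyRange_one_succ_right hab'
          rw [show b - 1 + 1 = b from by ring] at h
          exact h
        rw [hsplit, List.map_append, List.sum_append, ih (b-1) hab' (by omega)]
        simp only [List.map_cons, List.map_nil, List.sum_cons, List.sum_nil]
        by_cases h1 : a % 2 = t % 2 <;> by_cases h2 : (b-1) % 2 = t % 2 <;>
          simp only [h1, h2, if_true, if_false, not_true, not_false_iff, ite_true, ite_false] <;>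
          omega
  exact key (b - a).toNat b hab rfl

-- count of opposite-parity heads above t within 1..n
lemma count_heads (n t : Int) (ht1 : 1 ≤ t) (ht2 : t ≤ n) :
    ((PySem.List.pyRange 1 (n+1) 1).map
        (fun x => if x > t ∧ ¬(x % 2 = t % 2) then (1:Int) else 0)).sum
      = (n - t + 1) / 2 := by
  rw [PySem.List.pyRange_one_append 1 (t+1) (n+1) (by omega) (by omega),
      List.map_append, List.sum_append]
  rw [sum_zero_of_mem (PySem.List.pyRange 1 (t+1) 1) _ (by
    intro x hx
    rw [PySem.List.mem_pyRange_one] at hx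
    have hno : ¬ (x > t ∧ ¬(x % 2 = t % 2)) := by
      intro h
      omega
    simp [hno])]
  rw [List.map_congr_left (g := fun x => if ¬(x % 2 = t % 2) then (1:Int) else 0) (by
    intro x hx
    rw [PySem.List.mem_pyRange_one] at hx
    by_cases hp : x % 2 = t % 2
    · simp [hp]
    · have hc : x > t ∧ ¬(x % 2 = t % 2) := ⟨by omega, hp⟩
      simp [hc, hp])]
  rw [parity_count t (t+1) (n+1) (by omega)]
  have hne : ¬ ((t+1) % 2 = t % 2) := by omega
  rw [if_neg hne]
  omega

-- count of opposite-parity tails below h within 1..n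
lemma count_tails (n h : Int) (hh1 : 1 ≤ h) (hh2 : h ≤ n) :
    ((PySem.List.pyRange 1 (n+1) 1).map
        (fun x => if h > x ∧ ¬(h % 2 = x % 2) then (1:Int) else 0)).sum
      = h / 2 := by
  rw [PySem.List.pyRange_one_append 1 h (n+1) (by omega) (by omega),
      List.map_append, List.sum_append]
  rw [sum_zero_of_mem (PySem.List.pyRange h (n+1) 1) _ (by
    intro x hx
    rw [PySem.List.mem_pyRange_one] at hx
    have hno : ¬ (h > x ∧ ¬(h % 2 = x % 2)) := by
      intro hcon
      omega
    simp [hno])]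
  rw [List.map_congr_left (g := fun x => if ¬(x % 2 = h % 2) then (1:Int) else 0) (by
    intro x hx
    rw [PySem.List.mem_pyRange_one] at hx
    by_cases hp : x % 2 = h % 2
    · have hno : ¬ (h > x ∧ ¬(h % 2 = x % 2)) := by
        intro hcon
        omega
      simp [hno, hp]
    · have hc : h > x ∧ ¬(h % 2 = x % 2) := ⟨by omega, by omega⟩
      simp [hc, hp])]
  rw [parity_count h 1 h (by omega)]
  by_cases hp : (1:Int) % 2 = h % 2 <;> simp only [hp, if_true, if_false, ite_true, ite_false] <;>
    omega

-- sum of x/2 for x in 1..t-1 is (t-1)^2/4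
lemma sum_halves (t : Int) (ht : 1 ≤ t) :
    ((PySem.List.pyRange 1 t 1).map (fun x => x / 2)).sum = (t - 1) ^ 2 / 4 := by
  have key : ∀ (k : Nat) (t : Int), 1 ≤ t → (t - 1).toNat = k →
      ((PySem.List.pyRange 1 t 1).map (fun x => x / 2)).sum = (t - 1) ^ 2 / 4 := by
    intro k
    induction k with
    | zero =>
        intro t ht h0
        have h1 : t = 1 := by omega
        rw [h1]
        simp [PySem.List.pyRange_one_eq_nil (le_refl (1:Int))]
    | succ k ih =>
        intro t ht hk
        have ht' : (1:Int) ≤ t - 1 := by omega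
        have hsplit : PySem.List.pyRange 1 t 1
            = PySem.List.pyRange 1 (t-1) 1 ++ [t-1] := by
          have h := PySem.List.pyRange_one_succ_right ht'
          rw [show t - 1 + 1 = t from by ring] at h
          exact h
        rw [hsplit, List.map_append, List.sum_append, ih (t-1) (by omega) (by omega)]
        simp only [List.map_cons, List.map_nil, List.sum_cons, List.sum_nil, add_zero]
        rcases Int.even_or_odd (t-1) with ⟨c, hc⟩ | ⟨c, hc⟩
        · have e1 : t - 1 - 1 = 2*c - 1 := by omega
          have e2 : t - 1 = 2*c := by omega
          rw [e1, e2]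
          rw [show ((2*c - 1)^2 : Int) = 1 + 4 * (c^2 - c) from by ring,
              Int.add_mul_ediv_left _ _ (by norm_num : (4:Int) ≠ 0),
              show ((2*c)^2 : Int) = 0 + 4 * c^2 from by ring,
              Int.add_mul_ediv_left _ _ (by norm_num : (4:Int) ≠ 0),
              show ((2:Int)*c) = 0 + 2 * c from by ring,
              Int.add_mul_ediv_left _ _ (by norm_num : (2:Int) ≠ 0)]
          norm_num
        · have e1 : t - 1 - 1 = 2*c := by omega
          have e2 : t - 1 = 2*c + 1 := by omega
          rw [e1, e2]
          rw [show ((2*c)^2 : Int) = 0 + 4 * c^2 from by ring,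
              Int.add_mul_ediv_left _ _ (by norm_num : (4:Int) ≠ 0),
              show ((2*c+1)^2 : Int) = 1 + 4 * (c^2 + c) from by ring,
              Int.add_mul_ediv_left _ _ (by norm_num : (4:Int) ≠ 0),
              show ((2:Int)*c+1) = 1 + 2 * c from by ring,
              Int.add_mul_ediv_left _ _ (by norm_num : (2:Int) ≠ 0)]
          norm_num
  exact key (t-1).toNat t ht rfl

-- double sum over (h2, t2): decreasing opposite-parity pairs below t1
lemma count_pairs (n t1 : Int) (hb1 : 1 ≤ t1) (hb2 : t1 ≤ n) :
    ((PySem.List.pyRange 1 (n+1) 1).map (fun h2 =>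
        ((PySem.List.pyRange 1 (n+1) 1).map (fun t2 =>
            if t1 > h2 ∧ h2 > t2 ∧ ¬(h2 % 2 = t2 % 2) then (1:Int) else 0)).sum)).sum
      = (t1 - 1) ^ 2 / 4 := by
  rw [List.map_congr_left (g := fun h2 => if t1 > h2 then h2 / 2 else 0) (by
    intro x hx
    dsimp only
    rw [PySem.List.mem_pyRange_one] at hx
    by_cases hgt : t1 > x
    · rw [if_pos hgt, ← count_tails n x (by omega) (by omega)]
      apply congrArg
      apply List.map_congr_left
      intro t2 _
      by_cases hc : x > t2 ∧ ¬(x % 2 = t2 % 2)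
      · rw [if_pos ⟨hgt, hc.1, hc.2⟩, if_pos hc]
      · rw [if_neg (by
          intro hcon
          exact hc ⟨hcon.2.1, hcon.2.2⟩), if_neg hc]
    · rw [if_neg hgt]
      apply sum_zero_of_mem
      intro t2 _
      rw [if_neg (by
        intro hcon
        exact hgt hcon.1)])]
  rw [PySem.List.pyRange_one_append 1 t1 (n+1) (by omega) (by omega),
      List.map_append, List.sum_append]
  rw [sum_zero_of_mem (PySem.List.pyRange t1 (n+1) 1) _ (by
    intro x hx
    rw [PySem.List.mem_pyRange_one] at hx
    rw [if_neg (by omega)])]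
  rw [List.map_congr_left (g := fun x => x / 2) (by
    intro x hx
    dsimp only
    rw [PySem.List.mem_pyRange_one] at hx
    rw [if_pos (by omega)])]
  rw [sum_halves t1 (by omega)]
  simp

lemma mod2_eq (x : Int) : PySem.Int.mod x 2 = x % 2 :=
  PySem.Int.mod_eq_emod_of_pos (by norm_num)

-- the four loop layers of A, innermost first
lemma layer4 (n h1 t1 h2 : Int) (r : Int) :
    (PySem.List.pyRange 1 (n+1) 1).foldl (fun result t2 =>
        if h1 > t1 ∧ t1 > h2 ∧ h2 > t2 ∧ ¬(h1 % 2 = t1 % 2) ∧ ¬(h2 % 2 = t2 % 2)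
        then result + 1 else result) r
      = r + ((PySem.List.pyRange 1 (n+1) 1).map (fun t2 =>
          if h1 > t1 ∧ t1 > h2 ∧ h2 > t2 ∧ ¬(h1 % 2 = t1 % 2) ∧ ¬(h2 % 2 = t2 % 2)
          then (1:Int) else 0)).sum :=
  foldl_add_sum _ _ (fun r x => by split_ifs <;> simp) _ r

lemma layer3 (n h1 t1 : Int) (r : Int) :
    (PySem.List.pyRange 1 (n+1) 1).foldl (fun result h2 =>
        (PySem.List.pyRange 1 (n+1) 1).foldl (fun result t2 =>
          if h1 > t1 ∧ t1 > h2 ∧ h2 > t2 ∧ ¬(h1 % 2 = t1 % 2) ∧ ¬(h2 % 2 = t2 % 2)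
          then result + 1 else result) result) r
      = r + ((PySem.List.pyRange 1 (n+1) 1).map (fun h2 =>
          ((PySem.List.pyRange 1 (n+1) 1).map (fun t2 =>
            if h1 > t1 ∧ t1 > h2 ∧ h2 > t2 ∧ ¬(h1 % 2 = t1 % 2) ∧ ¬(h2 % 2 = t2 % 2)
            then (1:Int) else 0)).sum)).sum :=
  foldl_add_sum _ _ (fun r x => layer4 n h1 t1 x r) _ r

lemma layer2 (n h1 : Int) (r : Int) :
    (PySem.List.pyRange 1 (n+1) 1).foldl (fun result t1 =>
        (PySem.List.pyRange 1 (n+1) 1).foldl (fun result h2 =>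
          (PySem.List.pyRange 1 (n+1) 1).foldl (fun result t2 =>
            if h1 > t1 ∧ t1 > h2 ∧ h2 > t2 ∧ ¬(h1 % 2 = t1 % 2) ∧ ¬(h2 % 2 = t2 % 2)
            then result + 1 else result) result) result) r
      = r + ((PySem.List.pyRange 1 (n+1) 1).map (fun t1 =>
          ((PySem.List.pyRange 1 (n+1) 1).map (fun h2 =>
            ((PySem.List.pyRange 1 (n+1) 1).map (fun t2 =>
              if h1 > t1 ∧ t1 > h2 ∧ h2 > t2 ∧ ¬(h1 % 2 = t1 % 2) ∧ ¬(h2 % 2 = t2 % 2)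
              then (1:Int) else 0)).sum)).sum)).sum :=
  foldl_add_sum _ _ (fun r x => layer3 n h1 x r) _ r

lemma A_as_sum (n : Int) :
    two_snakes n
      = ((PySem.List.pyRange 1 (n+1) 1).map (fun h1 =>
          ((PySem.List.pyRange 1 (n+1) 1).map (fun t1 =>
            ((PySem.List.pyRange 1 (n+1) 1).map (fun h2 =>
              ((PySem.List.pyRange 1 (n+1) 1).map (fun t2 =>
                if h1 > t1 ∧ t1 > h2 ∧ h2 > t2 ∧ ¬(h1 % 2 = t1 % 2) ∧ ¬(h2 % 2 = t2 % 2)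
                then (1:Int) else 0)).sum)).sum)).sum)).sum := by
  unfold two_snakes
  simp only [mod2_eq, ne_eq]
  rw [foldl_add_sum _ _ (fun r x => layer2 n x r) _ 0]
  simp

lemma B_as_sum (n : Int) :
    two_snakes_alt n
      = ((PySem.List.pyRange 1 (n+1) 1).map (fun t =>
          (n - t + 1) / 2 * ((t - 1) ^ 2 / 4))).sum := by
  unfold two_snakes_alt
  simp only [PySem.Int.floordiv_eq_ediv_of_pos (by norm_num : (0:Int) < 2),
             PySem.Int.floordiv_eq_ediv_of_pos (by norm_num : (0:Int) < 4)]
  rw [foldl_add_sum _ _ (fun r t => rfl) _ 0]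
  simp

-- ===== VERDICT (by name: the statement is the Claim_ definition above) =====
theorem two_snakes_spec : Claim_equal_two_snakes := by
  intro n _
  unfold Spec_two_snakes
  rw [A_as_sum, B_as_sum, sum_sum_comm]
  refine congrArg List.sum (List.map_congr_left ?_)
  intro t1 ht1
  rw [PySem.List.mem_pyRange_one] at ht1
  have hb1 : 1 ≤ t1 := ht1.1
  have hb2 : t1 ≤ n := by omega
  simp only [e_factor]
  rw [List.map_congr_left (g := fun h1 =>
        (if h1 > t1 ∧ ¬(h1 % 2 = t1 % 2) then (1:Int) else 0) * ((t1 - 1) ^ 2 / 4)) (by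
    intro h1 _
    rw [List.map_congr_left (g := fun h2 =>
          (if h1 > t1 ∧ ¬(h1 % 2 = t1 % 2) then (1:Int) else 0)
            * ((PySem.List.pyRange 1 (n+1) 1).map (fun t2 =>
                if t1 > h2 ∧ h2 > t2 ∧ ¬(h2 % 2 = t2 % 2) then (1:Int) else 0)).sum) (by
      intro h2 _
      exact List.sum_map_mul_left _ _ _)]
    rw [List.sum_map_mul_left, count_pairs n t1 hb1 hb2])]
  rw [List.sum_map_mul_right, count_heads n t1 hb1 hb2]
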